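-- pv_equiv track=rewrite | github.com/BigFundamental/signal_classification | script/classifier.py | cyclicIntense
-- ===== SOURCE A (Python) =====
-- def cyclicIntense(seqs, interval):
--     cyclic_pair = 0
--     max_cyclic_pairs = 0
--     for i in range(0, interval):
--         cyclic_pair = 0
--         for j in range(i, len(seqs), interval):
--             if seqs[j] > 0:
--                 cyclic_pair += 1
--         max_cyclic_pairs = max(max_cyclic_pairs, cyclic_pair)
--     return max_cyclic_pairs
-- ===== SOURCE B (Python) =====
-- def cyclicIntense(seqs, interval):
--     if interval <= 0:
--         return 0
--     counts = {}
--     for j, v in enumerate(seqs):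
--         if v > 0:
--             r = j % interval
--             counts[r] = counts.get(r, 0) + 1
--     return max(counts.values(), default=0)
-- ===== Notes on version B (the rewrite author's own statement) =====
-- stated objective: faster
-- what changed: Replaces A's nested loops (for each residue class i in range(interval), a strided scan of seqs) by a single enumerate pass that tallies positives into a per-residue dict, returning max of the tallies (default 0); interval <= 0 is guarded to return 0 as A does via its empty outer range.
import Mathlib
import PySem

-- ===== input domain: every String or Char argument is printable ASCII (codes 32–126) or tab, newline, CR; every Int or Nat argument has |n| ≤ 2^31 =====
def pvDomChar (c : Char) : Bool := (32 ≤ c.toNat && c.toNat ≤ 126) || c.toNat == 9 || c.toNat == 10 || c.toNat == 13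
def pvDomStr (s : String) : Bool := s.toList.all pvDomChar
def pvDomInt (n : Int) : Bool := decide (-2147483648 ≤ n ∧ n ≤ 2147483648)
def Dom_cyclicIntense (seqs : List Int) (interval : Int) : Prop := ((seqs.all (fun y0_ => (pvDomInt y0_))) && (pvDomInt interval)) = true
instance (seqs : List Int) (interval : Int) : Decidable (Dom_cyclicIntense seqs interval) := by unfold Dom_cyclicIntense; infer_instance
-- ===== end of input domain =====

-- B replaces A's nested residue-class loops by one pass over enumerate(seqs) into a
-- per-residue dict of counts, then takes max of the counted values (objective: faster single scan).

-- ===== PORT A =====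
-- for i in range(0, interval): count positives at indices i, i+interval, …; keep the running max.
-- seqs[j] is ported as pyGetD (default 0): every j produced by range(i, len(seqs), interval) is in range.
def cyclicIntense (seqs : List Int) (interval : Int) : Int :=
  (PySem.List.pyRange 0 interval 1).foldl
    (fun max_cyclic_pairs i =>
      max max_cyclic_pairs
        ((PySem.List.pyRange i (seqs.length : Int) interval).foldl
          (fun cyclic_pair j =>
            if PySem.List.pyGetD seqs j 0 > 0 then cyclic_pair + 1 else cyclic_pair) 0))
    0

-- ===== PORT B =====
-- single pass: counts[r] = counts.get(r, 0) + 1 for each positive element's residue; max(values, default=0)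
def cyclicIntense_alt (seqs : List Int) (interval : Int) : Int :=
  if interval ≤ 0 then 0
  else
    let counts := (PySem.List.enumerate seqs 0).foldl
      (fun d p =>
        if p.2 > 0 then
          d.insert (PySem.Int.mod p.1 interval) (d.getD (PySem.Int.mod p.1 interval) 0 + 1)
        else d)
      PySem.Dict.empty
    PySem.List.maxD counts.values (fun v => v) 0

-- ===== PRECONDITION & SPEC =====
def Spec_cyclicIntense (seqs : List Int) (interval : Int) (out : Int) : Prop := out = cyclicIntense_alt seqs interval
instance (seqs : List Int) (interval : Int) (out : Int) : Decidable (Spec_cyclicIntense seqs interval out) := by unfold Spec_cyclicIntense; infer_instance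

-- ===== CLAIM (what is proved, stated in full; the proofs are below) =====
def Claim_equal_cyclicIntense : Prop := ∀ (seqs : List Int) (interval : Int), Dom_cyclicIntense seqs interval → Spec_cyclicIntense seqs interval (cyclicIntense seqs interval)

-- ===== LEMMAS AND PROOFS =====

-- the list of residues (mod t) of the indices of positive elements, in index order
def posRes (seqs : List Int) (t : Int) : List Int :=
  ((PySem.List.enumerate seqs 0).filter (fun p => decide (0 < p.2))).map
    (fun p => PySem.Int.mod p.1 t)

-- B's dict-building fold is the counter fold over posRes
theorem foldl_if_insert_eq (t : Int) (l : List (Int × Int)) (d : PySem.Dict Int Int) :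
    l.foldl
      (fun d p =>
        if p.2 > 0 then
          d.insert (PySem.Int.mod p.1 t) (d.getD (PySem.Int.mod p.1 t) 0 + 1)
        else d) d
    = ((l.filter (fun p => decide (0 < p.2))).map (fun p => PySem.Int.mod p.1 t)).foldl
        (fun d x => d.insert x (d.getD x 0 + 1)) d := by
  induction l generalizing d with
  | nil => rfl
  | cons a l ih =>
      by_cases h : 0 < a.2
      · simp [h, ih]
      · simp [h, ih]

-- range(i, b, t) is the residue-class filter of range(0, b)
theorem pyRange_step_eq_filter (t i b : Int) (ht : 0 < t) (hi0 : 0 ≤ i) (hit : i < t) :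
    PySem.List.pyRange i b t
      = (PySem.List.pyRange 0 b 1).filter (fun j => decide (PySem.Int.mod j t = i)) := by
  have hmem : ∀ x : Int, x ∈ PySem.List.pyRange i b t ↔
      x ∈ (PySem.List.pyRange 0 b 1).filter (fun j => decide (PySem.Int.mod j t = i)) := by
    intro x
    rw [PySem.List.mem_pyRange_iff_of_pos ht, List.mem_filter]
    simp only [PySem.List.mem_pyRange_one, decide_eq_true_eq, PySem.Int.mod_eq_emod_of_pos ht]
    constructor
    · rintro ⟨h1, h2, h3⟩
      refine ⟨⟨by omega, h2⟩, ?_⟩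
      have hx : x % t = i % t := Int.emod_eq_emod_iff_emod_sub_eq_zero.mpr (Int.emod_eq_zero_of_dvd h3)
      rw [hx, Int.emod_eq_of_lt hi0 hit]
    · rintro ⟨⟨h0, h2⟩, h3⟩
      have hdvd : t ∣ x - i := by
        apply Int.dvd_of_emod_eq_zero
        rw [← Int.emod_eq_emod_iff_emod_sub_eq_zero, h3, Int.emod_eq_of_lt hi0 hit]
      have hdm := Int.mul_ediv_add_emod x t
      have hq : 0 ≤ x / t := Int.ediv_nonneg h0 ht.le
      have hqt : 0 ≤ t * (x / t) := mul_nonneg ht.le hq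
      exact ⟨by linarith [hdm, hqt], h2, hdvd⟩
  have hp1 : List.Pairwise (· < ·) (PySem.List.pyRange i b t) := by
    rw [PySem.List.pyRange_of_pos i b ht, List.pairwise_map]
    exact List.pairwise_lt_range.imp (fun {a b} h => by
      have : (a : Int) < (b : Int) := by exact_mod_cast h
      nlinarith)
  have hp2 : List.Pairwise (· < ·)
      ((PySem.List.pyRange 0 b 1).filter (fun j => decide (PySem.Int.mod j t = i))) :=
    (PySem.List.pairwise_lt_pyRange_one 0 b).filter _
  have hperm := (List.perm_ext_iff_of_nodup
      (hp1.imp (fun h => ne_of_lt h)) (hp2.imp (fun h => ne_of_lt h))).mpr hmem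
  exact List.eq_of_perm_of_sorted
    (fun a b _ _ hab hba => absurd (lt_trans hab hba) (lt_irrefl a)) hp1 hp2 hperm

-- A's inner loop counts posRes occurrences of i
theorem inner_eq_count (seqs : List Int) (t i : Int) (ht : 0 < t) (hi0 : 0 ≤ i) (hit : i < t) :
    (PySem.List.pyRange i (seqs.length : Int) t).foldl
      (fun cyclic_pair j =>
        if PySem.List.pyGetD seqs j 0 > 0 then cyclic_pair + 1 else cyclic_pair) 0
    = ((posRes seqs t).count i : Int) := by
  have h1 : (fun (c j : Int) => if PySem.List.pyGetD seqs j 0 > 0 then c + 1 else c)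
      = (fun (c j : Int) => if (decide (0 < PySem.List.pyGetD seqs j 0)) = true then c + 1 else c) := by
    funext c j; simp
  rw [h1, PySem.List.foldl_count_if, pyRange_step_eq_filter t i _ ht hi0 hit, List.countP_filter]
  unfold posRes
  rw [List.count_eq_countP, List.countP_map, PySem.List.enumerate_eq_map_pyRange seqs 0,
    List.countP_filter, List.countP_map, PySem.List.len_eq]
  rw [zero_add]
  congr 1
  apply List.countP_congr
  intro x hx
  simp only [Function.comp_apply, Bool.and_eq_true, decide_eq_true_eq, beq_iff_eq]
  tauto

-- max(counter(R).values(), default=0) is the running max of counts over all residues in [0, t)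
theorem maxD_counter_eq (R : List Int) (t : Int) (_ht : 0 < t)
    (hR : ∀ k ∈ R, 0 ≤ k ∧ k < t) :
    PySem.List.maxD (PySem.Dict.counter R).values (fun v => v) 0
      = (PySem.List.pyRange 0 t 1).foldl (fun m i => max m ((R.count i : Int))) 0 := by
  set V := (PySem.Dict.counter R).values with hV
  set M := (PySem.List.pyRange 0 t 1).foldl (fun m i => max m ((R.count i : Int))) 0 with hM
  have hVmap : V = (PySem.Dict.counter R).keys.map (fun k => (PySem.Dict.counter R).getD k 0) :=
    PySem.Dict.values_eq_map_keys _ (PySem.Dict.nodup_keys_counter R) 0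
  have hvchar : ∀ v ∈ V, ∃ k ∈ R, v = (R.count k : Int) := by
    intro v hv
    rw [hVmap] at hv
    rcases List.mem_map.mp hv with ⟨k, hk, rfl⟩
    rw [PySem.Dict.keys_counter, PySem.Set.mem_ofList] at hk
    exact ⟨k, hk, (PySem.Dict.getD_counter R k)⟩
  have hmemV : ∀ k ∈ R, ((R.count k : Int)) ∈ V := by
    intro k hk
    rw [hVmap]
    refine List.mem_map.mpr ⟨k, ?_, ?_⟩
    · rw [PySem.Dict.keys_counter, PySem.Set.mem_ofList]; exact hk
    · rw [PySem.Dict.getD_counter]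
  have hfold := PySem.List.le_foldl_max_int (PySem.List.pyRange 0 t 1)
      (fun i => ((R.count i : Int))) 0
  have hMcases : M = 0 ∨ ∃ i ∈ PySem.List.pyRange 0 t 1, M = (R.count i : Int) := by
    have hmm : M = List.foldl max 0
        ((PySem.List.pyRange 0 t 1).map (fun i => ((R.count i : Int)))) := by
      rw [List.foldl_map]
    rcases PySem.List.foldl_max_mem
        ((PySem.List.pyRange 0 t 1).map (fun i => ((R.count i : Int)))) 0 with h | h
    · left; rw [hmm, h]
    · right; rcases List.mem_map.mp h with ⟨i, hi, hei⟩; exact ⟨i, hi, by rw [hmm, hei]⟩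
  unfold PySem.List.maxD
  cases hmax : PySem.List.max? V (fun v => v) with
  | none =>
      rw [PySem.List.max?_eq_none_iff] at hmax
      rcases hMcases with h | ⟨i, hi, h⟩
      · simp [h]
      · have hz : R.count i = 0 := by
          by_contra hne
          have hiR : i ∈ R := List.count_pos_iff.mp (Nat.pos_of_ne_zero hne)
          have hmem := hmemV i hiR
          rw [hmax] at hmem
          exact absurd hmem List.not_mem_nil
        simp [h, hz]
  | some m =>
      simp only [Option.getD_some]
      have hmV : m ∈ V := PySem.List.max?_mem hmax
      rcases hvchar m hmV with ⟨k, hkR, rfl⟩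
      have hk := hR k hkR
      have hle1 : (R.count k : Int) ≤ M :=
        hfold.2 k (PySem.List.mem_pyRange_one.mpr ⟨hk.1, hk.2⟩)
      have hle2 : M ≤ (R.count k : Int) := by
        rcases hMcases with h | ⟨i, hi, h⟩
        · rw [h]; exact_mod_cast Nat.zero_le _
        · rw [h]
          by_cases hz : R.count i = 0
          · rw [hz]; exact_mod_cast Nat.zero_le _
          · have hiR : i ∈ R := List.count_pos_iff.mp (Nat.pos_of_ne_zero hz)
            exact PySem.List.max?_isMax hmax _ (hmemV i hiR)
      omega

-- ===== VERDICT (by name: the statement is the Claim_ definition above) =====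
theorem cyclicIntense_spec : Claim_equal_cyclicIntense := by
  intro seqs t _
  unfold Spec_cyclicIntense cyclicIntense cyclicIntense_alt
  by_cases ht : t ≤ 0
  · simp [ht, PySem.List.pyRange_one_eq_nil ht]
  · rw [not_le] at ht
    simp only [if_neg (not_le.mpr ht)]
    rw [foldl_if_insert_eq t, PySem.Dict.foldl_insert_getD_add_one_eq_counter]
    rw [maxD_counter_eq _ t ht]
    · refine (PySem.List.foldl_congr_mem' _ _ _ _ ?_).symm
      intro i hi m
      rw [PySem.List.mem_pyRange_one] at hi
      rw [inner_eq_count seqs t i ht hi.1 hi.2]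
      simp [posRes]
    · intro k hk
      unfold posRes at hk
      rcases List.mem_map.mp hk with ⟨p, _, rfl⟩
      exact ⟨PySem.Int.mod_nonneg _ ht, PySem.Int.mod_lt _ ht⟩
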